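-- pv_equiv track=rewrite | github.com/anandamatos/kalkie | src/calisthenics_calc.py | redistribute_small_values
-- ===== SOURCE A (Python) =====
-- def redistribute_small_values(block, subblocks):
--     """Redistribui valores <=5 combinando-os com elementos adjacentes."""
--     if all(x > 5 for x in subblocks) or len(subblocks) == 1:
--         return subblocks
--
--     result = []
--     temp = 0
--     for val in subblocks:
--         if val <= 5:
--             temp += val
--         else:
--             if temp > 0:
--                 if result:
--                     result[-1] += temp
--                 else:
--                     result.append(temp)
--                 temp = 0
--             result.append(val)
--
--     if temp > 0:
--         if result:
--             result[-1] += temp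
--         else:
--             result.append(temp)
--
--     if result and result[0] <= 5 and len(result) > 1:
--         result[1] += result[0]
--         result = result[1:]
--
--     if any(x <= 5 for x in result) and len(result) > 1:
--         return redistribute_small_values(block, result)
--
--     if sum(result) != block:
--         diff = block - sum(result)
--         result[-1] += diff
--
--     return result
-- ===== SOURCE B (Python) =====
-- from itertools import groupby
--
-- def redistribute_small_values(block, subblocks):
--     """Run-based rewrite: one pass over maximal runs of small/large values, no recursion."""
--     if len(subblocks) == 1 or all(v > 5 for v in subblocks):
--         return subblocks
--     out = []
--     carry = 0
--     for is_small, run in groupby(subblocks, key=lambda v: v <= 5):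
--         run = list(run)
--         if is_small:
--             carry += sum(run)
--         else:
--             if carry > 0:
--                 if out:
--                     out[-1] += carry
--                 else:
--                     out.append(carry)
--                 carry = 0
--             out.extend(run)
--     if carry > 0:
--         if out:
--             out[-1] += carry
--         else:
--             out.append(carry)
--     if out and out[0] <= 5 and len(out) > 1:
--         out = [out[1] + out[0]] + out[2:]
--     if sum(out) != block:
--         out[-1] += block - sum(out)
--     return out
-- ===== Notes on version B (the rewrite author's own statement) =====
-- stated objective: alternative
-- what changed: B replaces A's tail recursion and per-element merge loop by a single non-recursive pass over maximal runs of small/large values (itertools.groupby), dropping A's recursive re-check, which is provably dead code.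
import Mathlib
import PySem

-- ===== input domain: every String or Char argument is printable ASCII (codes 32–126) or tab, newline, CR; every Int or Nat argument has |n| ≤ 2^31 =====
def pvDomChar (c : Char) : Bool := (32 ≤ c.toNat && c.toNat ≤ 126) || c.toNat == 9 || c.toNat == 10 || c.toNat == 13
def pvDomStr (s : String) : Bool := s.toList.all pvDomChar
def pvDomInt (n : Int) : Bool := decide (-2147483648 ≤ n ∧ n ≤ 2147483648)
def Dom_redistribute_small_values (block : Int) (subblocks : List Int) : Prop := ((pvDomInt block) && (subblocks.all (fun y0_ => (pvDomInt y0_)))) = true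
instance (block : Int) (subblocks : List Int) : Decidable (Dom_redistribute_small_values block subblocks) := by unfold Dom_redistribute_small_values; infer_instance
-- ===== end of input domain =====

-- B merges small values in one run-based pass (groupby) with no recursion; A's recursive re-check is proved dead. Objective: alternative.


-- ===== PORT A =====
-- Python's `if result: result[-1] += t  else: result.append(t)` (both ports contain these lines)
def pyAddLast : List Int → Int → List Int
  | [], t => [t]
  | [x], t => [x + t]
  | x :: xs, t => x :: pyAddLast xs t

-- one iteration of A's `for val in subblocks` loop body, state = (result, temp)
def rsvStep (st : List Int × Int) (val : Int) : List Int × Int :=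
  if val ≤ 5 then (st.1, st.2 + val)
  else if st.2 > 0 then (pyAddLast st.1 st.2 ++ [val], 0)
  else (st.1 ++ [val], st.2)

-- A's head fixup: `if result and result[0] <= 5 and len(result) > 1: result[1] += result[0]; result = result[1:]`
def rsvFixup : List Int → List Int
  | r0 :: r1 :: rest => if r0 ≤ 5 then (r1 + r0) :: rest else r0 :: r1 :: rest
  | r => r

-- A with a fuel counter making the recursion structural; the recursive branch is proved
-- unreachable below (rsvFixup_guard), so the fuel-0 fallback is never taken.
def rsvGo : Nat → Int → List Int → List Int
  | 0, _, subblocks => subblocks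
  | fuel + 1, block, subblocks =>
    if subblocks.all (fun x => decide (5 < x)) || subblocks.length == 1 then subblocks
    else
      let p := subblocks.foldl rsvStep ([], 0)
      let r1 := if p.2 > 0 then pyAddLast p.1 p.2 else p.1
      let r2 := rsvFixup r1
      if r2.any (fun x => decide (x ≤ 5)) && decide (1 < r2.length) then
        rsvGo fuel block r2
      else
        -- `result[-1] += diff` raises IndexError on empty result: excluded by Pre_
        if r2.sum ≠ block then pyAddLast r2 (block - r2.sum) else r2

def redistribute_small_values (block : Int) (subblocks : List Int) : List Int :=
  rsvGo (subblocks.length + 1) block subblocks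

-- ===== PORT B =====
-- itertools.groupby(subblocks, key=lambda v: v <= 5), ported by hand (exact: maximal adjacent runs)
def splitRuns : List Int → List (Bool × List Int)
  | [] => []
  | v :: vs =>
    match splitRuns vs with
    | (b, run) :: rest =>
      if decide (v ≤ 5) == b then (b, v :: run) :: rest
      else (decide (v ≤ 5), [v]) :: (b, run) :: rest
    | [] => [(decide (v ≤ 5), [v])]

-- one iteration of B's loop over runs, state = (out, carry)
def bStep (st : List Int × Int) (g : Bool × List Int) : List Int × Int :=
  if g.1 then (st.1, st.2 + g.2.sum)
  else
    let out := if st.2 > 0 then pyAddLast st.1 st.2 else st.1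
    (out ++ g.2, if st.2 > 0 then 0 else st.2)

-- B's head fixup: `if out and out[0] <= 5 and len(out) > 1: out = [out[1] + out[0]] + out[2:]`
def altFixup (out : List Int) : List Int :=
  if !out.isEmpty && decide (out.headD 0 ≤ 5) && decide (1 < out.length) then
    (out.getD 1 0 + out.headD 0) :: out.drop 2
  else out

def redistribute_small_values_alt (block : Int) (subblocks : List Int) : List Int :=
  if subblocks.length == 1 || subblocks.all (fun v => decide (5 < v)) then subblocks
  else
    let p := (splitRuns subblocks).foldl bStep ([], 0)
    let out := if p.2 > 0 then pyAddLast p.1 p.2 else p.1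
    let out2 := altFixup out
    if out2.sum ≠ block then pyAddLast out2 (block - out2.sum) else out2

-- ===== PRECONDITION & SPEC =====
-- Pre_ excludes exactly the inputs on which Python A raises IndexError (`result[-1] += diff`
-- on an empty result): at least two values, all ≤ 5, non-positive sum, and block ≠ 0.
-- Python B raises IndexError on exactly the same inputs.
def Pre_redistribute_small_values (block : Int) (subblocks : List Int) : Prop :=
  ¬ (2 ≤ subblocks.length ∧ (∀ v ∈ subblocks, v ≤ 5) ∧ subblocks.sum ≤ 0 ∧ block ≠ 0)
instance (block : Int) (subblocks : List Int) : Decidable (Pre_redistribute_small_values block subblocks) := by unfold Pre_redistribute_small_values; infer_instance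
def pvWitness_redistribute_small_values : Int × List Int := (20, [3, 10, 2])

def Spec_redistribute_small_values (block : Int) (subblocks : List Int) (out : List Int) : Prop := out = redistribute_small_values_alt block subblocks
instance (block : Int) (subblocks : List Int) (out : List Int) : Decidable (Spec_redistribute_small_values block subblocks out) := by unfold Spec_redistribute_small_values; infer_instance

-- ===== CLAIM (what is proved, stated in full; the proofs are below) =====
def Claim_equal_redistribute_small_values : Prop := ∀ (block : Int) (subblocks : List Int), Dom_redistribute_small_values block subblocks → Pre_redistribute_small_values block subblocks → Spec_redistribute_small_values block subblocks (redistribute_small_values block subblocks)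

-- ===== LEMMAS AND PROOFS =====

-- invariant of A's merge state: every element of result after the head is > 5, the head is > 0
def RsvInv : List Int → Prop
  | [] => True
  | x :: xs => 0 < x ∧ ∀ y ∈ xs, 5 < y

theorem allBig_pyAddLast (xs : List Int) (t : Int) (h : ∀ y ∈ xs, 5 < y) (ht : 0 < t)
    (hne : xs ≠ []) : ∀ y ∈ pyAddLast xs t, 5 < y := by
  induction xs with
  | nil => simp at hne
  | cons x xs ih =>
    cases xs with
    | nil =>
      simp [pyAddLast]
      have := h x (by simp)
      omega
    | cons y ys =>
      simp only [pyAddLast]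
      intro z hz
      rcases List.mem_cons.mp hz with rfl | hz
      · exact h z (by simp)
      · exact ih (fun a ha => h a (List.mem_cons_of_mem _ ha)) (by simp) z hz

theorem inv_pyAddLast (r : List Int) (t : Int) (h : RsvInv r) (ht : 0 < t) :
    RsvInv (pyAddLast r t) := by
  cases r with
  | nil => simpa [pyAddLast, RsvInv] using ht
  | cons x xs =>
    cases xs with
    | nil =>
      obtain ⟨hx, _⟩ := h
      simp [pyAddLast, RsvInv]; omega
    | cons y ys =>
      obtain ⟨hx, hxs⟩ := h
      refine ⟨hx, ?_⟩
      exact allBig_pyAddLast (y :: ys) t hxs ht (by simp)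

theorem inv_append_big (r : List Int) (v : Int) (h : RsvInv r) (hv : 5 < v) :
    RsvInv (r ++ [v]) := by
  cases r with
  | nil => simp [RsvInv]; omega
  | cons x xs =>
    obtain ⟨hx, hxs⟩ := h
    refine ⟨hx, ?_⟩
    intro y hy
    rcases List.mem_append.mp hy with hy | hy
    · exact hxs y hy
    · simp at hy; omega

theorem inv_rsvStep (st : List Int × Int) (v : Int) (h : RsvInv st.1) :
    RsvInv (rsvStep st v).1 := by
  unfold rsvStep
  split
  · exact h
  · split
    · exact inv_append_big _ v (inv_pyAddLast st.1 st.2 h (by omega)) (by omega)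
    · exact inv_append_big _ v h (by omega)

theorem inv_foldl (l : List Int) (st : List Int × Int) (h : RsvInv st.1) :
    RsvInv (l.foldl rsvStep st).1 := by
  induction l generalizing st with
  | nil => exact h
  | cons v vs ih => exact ih _ (inv_rsvStep st v h)

theorem inv_flush (p : List Int × Int) (h : RsvInv p.1) :
    RsvInv (if p.2 > 0 then pyAddLast p.1 p.2 else p.1) := by
  split
  · exact inv_pyAddLast p.1 p.2 h (by omega)
  · exact h

theorem rsvFixup_guard (r : List Int) (h : RsvInv r) :
    ((rsvFixup r).any (fun x => decide (x ≤ 5)) && decide (1 < (rsvFixup r).length)) = false := by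
  match r with
  | [] => simp [rsvFixup]
  | [x] => simp [rsvFixup]
  | r0 :: r1 :: rest =>
    obtain ⟨h0, hrest⟩ := h
    have h1 : 5 < r1 := hrest r1 (by simp)
    simp only [rsvFixup]
    split
    · have : ((r1 + r0) :: rest).any (fun x => decide (x ≤ 5)) = false := by
        simp only [List.any_eq_false]
        intro x hx
        rcases List.mem_cons.mp hx with rfl | hx
        · simp; omega
        · have := hrest x (List.mem_cons_of_mem _ hx); simp; omega
      simp [this]
    · have : (r0 :: r1 :: rest).any (fun x => decide (x ≤ 5)) = false := by
        simp only [List.any_eq_false]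
        intro x hx
        rcases List.mem_cons.mp hx with rfl | hx
        · simp; omega
        · rcases List.mem_cons.mp hx with rfl | hx
          · simp; omega
          · have := hrest x (List.mem_cons_of_mem _ hx); simp; omega
      simp [this]

theorem fixup_eq (r : List Int) : altFixup r = rsvFixup r := by
  match r with
  | [] => simp [rsvFixup, altFixup]
  | [x] => simp [rsvFixup, altFixup]
  | r0 :: r1 :: rest =>
    simp only [rsvFixup, altFixup]
    by_cases h : r0 ≤ 5 <;> simp [h, List.length_cons]

theorem splitRuns_eq_nil (l : List Int) (h : splitRuns l = []) : l = [] := by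
  cases l with
  | nil => rfl
  | cons v vs =>
    exfalso
    cases h' : splitRuns vs with
    | nil => simp [splitRuns, h'] at h
    | cons g rest =>
      obtain ⟨b, run⟩ := g
      by_cases hb : decide (v ≤ 5) == b <;> simp [splitRuns, h', hb] at h

theorem bStep_single (st : List Int × Int) (v : Int) :
    bStep st (decide (v ≤ 5), [v]) = rsvStep st v := by
  unfold bStep rsvStep
  by_cases hv : v ≤ 5
  · simp [hv]
  · simp only [hv, decide_false, if_false, Bool.false_eq_true]
    by_cases ht : st.2 > 0 <;> simp [ht]

theorem bStep_cons (st : List Int × Int) (v : Int) (run : List Int) :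
    bStep st (decide (v ≤ 5), v :: run) = bStep (rsvStep st v) (decide (v ≤ 5), run) := by
  unfold bStep rsvStep
  by_cases hv : v ≤ 5
  · simp [hv]; ring
  · simp only [hv, decide_false, if_false, Bool.false_eq_true]
    by_cases ht : st.2 > 0 <;> simp [ht]

theorem foldl_splitRuns (l : List Int) : ∀ st : List Int × Int,
    (splitRuns l).foldl bStep st = l.foldl rsvStep st := by
  induction l with
  | nil => intro st; simp [splitRuns]
  | cons v vs ih =>
    intro st
    cases h : splitRuns vs with
    | nil =>
      have hvs : vs = [] := splitRuns_eq_nil vs h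
      subst hvs
      simp [splitRuns, bStep_single]
    | cons g rest =>
      obtain ⟨b, run⟩ := g
      by_cases hb : decide (v ≤ 5) == b
      · have hb' : b = decide (v ≤ 5) := (beq_iff_eq.mp hb).symm
        subst hb'
        simp only [splitRuns, h, beq_self_eq_true, if_true, List.foldl_cons, bStep_cons]
        have := ih (rsvStep st v)
        rw [h] at this
        simpa using this
      · simp only [splitRuns, h, hb, if_false, Bool.false_eq_true, List.foldl_cons, bStep_single]
        have := ih (rsvStep st v)
        rw [h] at this
        simpa using this

-- ===== VERDICT (by name: the statement is the Claim_ definition above) =====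
theorem redistribute_small_values_spec : Claim_equal_redistribute_small_values := by
  intro block subblocks _ _
  unfold Spec_redistribute_small_values redistribute_small_values redistribute_small_values_alt
  simp only [rsvGo]
  rw [Bool.or_comm]
  cases hg : (subblocks.length == 1 || subblocks.all fun x => decide (5 < x)) with
  | true => simp
  | false =>
    simp only [Bool.false_eq_true, if_false]
    rw [foldl_splitRuns]
    have hinv : RsvInv (subblocks.foldl rsvStep ([], 0)).1 :=
      inv_foldl subblocks ([], 0) trivial
    have hinv1 : RsvInv (if (subblocks.foldl rsvStep ([], 0)).2 > 0 then
        pyAddLast (subblocks.foldl rsvStep ([], 0)).1 (subblocks.foldl rsvStep ([], 0)).2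
        else (subblocks.foldl rsvStep ([], 0)).1) := inv_flush _ hinv
    simp only [fixup_eq, rsvFixup_guard _ hinv1, Bool.false_eq_true, if_false]
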